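-- pv_equiv track=rewrite | github.com/transientskp/lpf | lpf/simulation/transient_simulator.py | any_intersection_sorted
-- ===== SOURCE A (Python) =====
-- def any_intersection_sorted(intervals, reverse=False):
--     for i in range(len(intervals) - 1):
--         if reverse:
--             if intervals[i][0] < intervals[i + 1][0]:
--                 return True
--         else:
--             if intervals[i][0] > intervals[i + 1][0]:
--                 return True
--     return False
-- ===== SOURCE B (Python) =====
-- def any_intersection_sorted(intervals, reverse=False):
--     keys = [iv[0] for iv in intervals]
--     return keys != sorted(keys, reverse=reverse)
-- ===== Notes on version B (the rewrite author's own statement) =====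
-- stated objective: simpler
-- what changed: Replaces the indexed adjacent-pair scan with early return by extracting the key list once and comparing it against its sorted copy in the requested direction.
import Mathlib
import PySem

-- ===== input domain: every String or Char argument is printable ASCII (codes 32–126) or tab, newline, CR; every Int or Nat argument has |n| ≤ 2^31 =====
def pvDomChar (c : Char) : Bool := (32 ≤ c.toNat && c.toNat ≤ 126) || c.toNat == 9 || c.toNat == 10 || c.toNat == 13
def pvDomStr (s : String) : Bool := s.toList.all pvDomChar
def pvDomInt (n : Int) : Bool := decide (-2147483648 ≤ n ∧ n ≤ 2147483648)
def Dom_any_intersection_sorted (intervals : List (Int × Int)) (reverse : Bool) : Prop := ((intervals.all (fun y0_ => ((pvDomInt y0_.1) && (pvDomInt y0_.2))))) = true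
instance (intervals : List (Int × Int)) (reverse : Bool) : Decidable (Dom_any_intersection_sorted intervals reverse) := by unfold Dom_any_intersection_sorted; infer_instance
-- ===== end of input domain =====

-- B replaces A's indexed adjacent-pair scan by a sort-and-compare of the key list (a different algorithm; simpler to read, not faster).


-- ===== PORT A =====
-- for i in range(len(intervals)-1): early-return True on an out-of-order adjacent pair
def any_intersection_sorted (intervals : List (Int × Int)) (reverse : Bool) : Bool :=
  (PySem.List.pyRange 0 ((intervals.length : Int) - 1) 1).any (fun i =>
    match PySem.List.pyGet? intervals i, PySem.List.pyGet? intervals (i + 1) with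
    | some a, some b => if reverse then decide (a.1 < b.1) else decide (a.1 > b.1)
    | _, _ => false)

-- ===== PORT B =====
-- keys = [iv[0] for iv in intervals]; return keys != sorted(keys, reverse=reverse)
def any_intersection_sorted_alt (intervals : List (Int × Int)) (reverse : Bool) : Bool :=
  let keys := intervals.map (fun iv => iv.1)
  decide (keys ≠ PySem.List.sorted keys (fun x => x) reverse)

-- ===== PRECONDITION & SPEC =====
def Spec_any_intersection_sorted (intervals : List (Int × Int)) (reverse : Bool) (out : Bool) : Prop := out = any_intersection_sorted_alt intervals reverse
instance (intervals : List (Int × Int)) (reverse : Bool) (out : Bool) : Decidable (Spec_any_intersection_sorted intervals reverse out) := by unfold Spec_any_intersection_sorted; infer_instance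

-- ===== CLAIM (what is proved, stated in full; the proofs are below) =====
def Claim_equal_any_intersection_sorted : Prop := ∀ (intervals : List (Int × Int)) (reverse : Bool), Dom_any_intersection_sorted intervals reverse → Spec_any_intersection_sorted intervals reverse (any_intersection_sorted intervals reverse)

-- ===== LEMMAS AND PROOFS =====

-- A returns true iff some adjacent key pair violates the requested order.
theorem portA_iff (ivs : List (Int × Int)) (rev : Bool) :
    any_intersection_sorted ivs rev = true ↔
      ∃ (k : Nat) (_h : k + 1 < ivs.length),
        (if rev then ivs[k].1 < ivs[k + 1].1 else ivs[k + 1].1 < ivs[k].1) := by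
  unfold any_intersection_sorted
  rw [List.any_eq_true]
  constructor
  · rintro ⟨i, hi, hb⟩
    rw [PySem.List.mem_pyRange_one] at hi
    obtain ⟨h0, hlt⟩ := hi
    have hk : i = (i.toNat : Int) := (Int.toNat_of_nonneg h0).symm
    have hlen : i.toNat + 1 < ivs.length := by omega
    rw [hk] at hb
    have h1 : ((i.toNat : Int) + 1) = ((i.toNat + 1 : Nat) : Int) := by push_cast; ring
    rw [h1, PySem.List.pyGet?_natCast, PySem.List.pyGet?_natCast,
        List.getElem?_eq_getElem (by omega : i.toNat < ivs.length),
        List.getElem?_eq_getElem hlen] at hb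
    refine ⟨i.toNat, hlen, ?_⟩
    cases rev <;> simpa using hb
  · rintro ⟨k, h, hcmp⟩
    refine ⟨(k : Int), ?_, ?_⟩
    · rw [PySem.List.mem_pyRange_one]; omega
    · have h1 : ((k : Int) + 1) = ((k + 1 : Nat) : Int) := by push_cast; ring
      rw [h1, PySem.List.pyGet?_natCast, PySem.List.pyGet?_natCast,
          List.getElem?_eq_getElem (by omega : k < ivs.length),
          List.getElem?_eq_getElem h]
      cases rev <;> simpa using hcmp

-- a list of Ints equals its ascending sorted copy iff it is pairwise ≤
theorem eq_sorted_iff_pairwise (keys : List Int) :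
    keys = PySem.List.sorted keys (fun x => x) ↔ keys.Pairwise (· ≤ ·) := by
  constructor
  · intro h
    have hp := PySem.List.sorted_pairwise keys (fun x => x)
    rw [← h] at hp
    exact hp
  · intro h
    exact (PySem.List.sorted_eq_self_of_pairwise keys (fun x => x) h).symm

-- a list of Ints equals its descending sorted copy iff it is pairwise ≥
theorem eq_sorted_rev_iff_pairwise (keys : List Int) :
    keys = PySem.List.sorted keys (fun x => x) true ↔ keys.Pairwise (fun a b => b ≤ a) := by
  constructor
  · intro h
    have hp := PySem.List.sorted_pairwise_rev keys (fun x => x)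
    rw [← h] at hp
    exact hp
  · intro h
    exact (PySem.List.sorted_rev_eq_self_of_pairwise keys (fun x => x) h).symm

-- pairwise ≤ reduces to the adjacent pairs (transitivity)
theorem pairwise_le_iff_adjacent (keys : List Int) :
    keys.Pairwise (· ≤ ·) ↔ ∀ (i : Nat) (_h : i + 1 < keys.length), keys[i] ≤ keys[i + 1] := by
  rw [← List.isChain_iff_pairwise, List.isChain_iff_getElem]

theorem pairwise_ge_iff_adjacent (keys : List Int) :
    keys.Pairwise (fun a b : Int => b ≤ a) ↔
      ∀ (i : Nat) (_h : i + 1 < keys.length), keys[i + 1] ≤ keys[i] := by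
  have : (fun a b : Int => b ≤ a) = (· ≥ ·) := rfl
  rw [this, ← List.isChain_iff_pairwise, List.isChain_iff_getElem]

theorem main_eq (ivs : List (Int × Int)) (rev : Bool) :
    any_intersection_sorted ivs rev = any_intersection_sorted_alt ivs rev := by
  rw [Bool.eq_iff_iff, portA_iff]
  unfold any_intersection_sorted_alt
  simp only [decide_eq_true_eq, ne_eq]
  cases rev
  · rw [eq_sorted_iff_pairwise, pairwise_le_iff_adjacent]
    simp [not_le]
  · rw [eq_sorted_rev_iff_pairwise, pairwise_ge_iff_adjacent]
    simp [not_le]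

-- ===== VERDICT (by name: the statement is the Claim_ definition above) =====
theorem any_intersection_sorted_spec : Claim_equal_any_intersection_sorted := by
  intro ivs rev _
  unfold Spec_any_intersection_sorted
  exact main_eq ivs rev
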